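-- pv_equiv track=rewrite | github.com/ForensicTools/GRREAT-475_2141-Chaigon-Failey-Siebert | GRREAT/pyssdeep.py | eliminate_sequences
-- ===== SOURCE A (Python) =====
-- import copy
--
-- def eliminate_sequences(string):
-- 	length = len(string)
-- 	if length < 3:
-- 		return copy.copy(string)
--
-- 	j = 3
-- 	ret = string[0:3]
-- 	for i in range(3, length):
-- 		if string[i] != string[i-1] or string[i] != string[i-2] or string[i] != string[i-3]:
-- 			ret += string[i]
-- 			j += 1
--
-- 	return ret
-- ===== SOURCE B (Python) =====
-- def eliminate_sequences(string):
-- 	# Segment the string into maximal runs of equal characters: an outer loop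
-- 	# jumps from run start to run start, an inner scan finds each run's end,
-- 	# and each run is emitted truncated to its first 3 characters.
-- 	pieces = []
-- 	i = 0
-- 	n = len(string)
-- 	while i < n:
-- 		j = i + 1
-- 		while j < n and string[j] == string[i]:
-- 			j += 1
-- 		pieces.append(string[i:min(i + 3, j)])
-- 		i = j
-- 	return ''.join(pieces)
-- ===== Notes on version B (the rewrite author's own statement) =====
-- stated objective: alternative
-- what changed: Replaces A's per-character lookback loop (comparing string[i] with string[i-1..i-3] and appending kept characters one by one) by run-length segmentation: an outer loop jumps from maximal run to maximal run, an inner scan locates each run's end, and each run is emitted as a slice truncated to 3 characters and joined.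
import Mathlib
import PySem

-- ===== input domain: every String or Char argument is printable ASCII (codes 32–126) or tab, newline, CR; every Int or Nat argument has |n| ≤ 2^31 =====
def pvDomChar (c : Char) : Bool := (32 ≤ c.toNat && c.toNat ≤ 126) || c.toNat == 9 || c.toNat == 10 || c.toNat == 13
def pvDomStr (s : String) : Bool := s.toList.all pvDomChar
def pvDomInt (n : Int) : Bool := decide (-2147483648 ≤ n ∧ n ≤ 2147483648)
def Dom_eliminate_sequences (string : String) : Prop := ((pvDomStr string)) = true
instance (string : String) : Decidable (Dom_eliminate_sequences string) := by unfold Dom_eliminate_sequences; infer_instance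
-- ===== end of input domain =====

-- B replaces A's per-character lookback loop by run-length segmentation: find each maximal run of
-- equal characters, truncate it to 3 and join the pieces (alternative decomposition, same cost).
-- ===== PORT A =====
-- the loop condition string[i] != string[i-1] or string[i] != string[i-2] or string[i] != string[i-3];
-- pyGetD is exact here: every index the loop uses lies in [0, len(string)).
def esCond (chars : List Char) (i : Int) : Bool :=
  PySem.List.pyGetD chars i ' ' != PySem.List.pyGetD chars (i-1) ' ' ||
  PySem.List.pyGetD chars i ' ' != PySem.List.pyGetD chars (i-2) ' ' ||
  PySem.List.pyGetD chars i ' ' != PySem.List.pyGetD chars (i-3) ' '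

-- A's counter j is written but never read; it is omitted. copy.copy on an immutable str is the str itself.
def eliminate_sequences (string : String) : String :=
  let chars := string.toList
  let length : Int := chars.length
  if length < 3 then string
  else
    let ret := PySem.List.slice chars (some 0) (some 3)
    let ret := (PySem.List.pyRange 3 length 1).foldl
      (fun ret i => if esCond chars i then ret ++ [PySem.List.pyGetD chars i ' '] else ret) ret
    String.ofList ret

-- ===== PORT B =====
-- the inner while loop 'j += 1 while string[j] == string[i]': number of further copies of c at the front
def esScan (c : Char) : List Char → Nat
  | [] => 0
  | x :: xs => if x == c then esScan c xs + 1 else 0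

-- the outer while loop: each maximal run, truncated to its first 3 characters
def esRuns : List Char → List (List Char)
  | [] => []
  | c :: rest =>
      List.take 3 (c :: rest.take (esScan c rest)) :: esRuns (rest.drop (esScan c rest))
  termination_by l => l.length
  decreasing_by simp

def eliminate_sequences_alt (string : String) : String :=
  String.ofList (esRuns string.toList).flatten

-- ===== PRECONDITION & SPEC =====
def Spec_eliminate_sequences (string : String) (out : String) : Prop := out = eliminate_sequences_alt string
instance (string : String) (out : String) : Decidable (Spec_eliminate_sequences string out) := by unfold Spec_eliminate_sequences; infer_instance

-- ===== CLAIM (what is proved, stated in full; the proofs are below) =====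
def Claim_equal_eliminate_sequences : Prop := ∀ (string : String), Dom_eliminate_sequences string → Spec_eliminate_sequences string (eliminate_sequences string)

-- ===== LEMMAS AND PROOFS =====

-- proof-only intermediate: a streaming (last char, run length) machine; both ports equal its output
def esStep (st : List Char × Option Char × Int) (c : Char) : List Char × Option Char × Int :=
  let run : Int := if some c == st.2.1 then st.2.2 + 1 else 1
  let out := if run ≤ 3 then st.1 ++ [c] else st.1
  (out, some c, run)

theorem esStep_invariant (l : List Char) (k : Nat) (hk : k ≤ l.length) :
    ∃ r : Int,
      (l.take k).foldl esStep ([], (none : Option Char), (0 : Int)) =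
        ((PySem.List.pyRange 3 (k : Int) 1).foldl
            (fun ret i => if esCond l i then ret ++ [PySem.List.pyGetD l i ' '] else ret)
            (l.take (min k 3)),
         (if k = 0 then none else some (l.getD (k-1) ' ')),
         r)
      ∧ (k ≠ 0 → 1 ≤ r)
      ∧ (2 ≤ r ↔ (2 ≤ k ∧ l.getD (k-1) ' ' = l.getD (k-2) ' '))
      ∧ (3 ≤ r ↔ (3 ≤ k ∧ l.getD (k-1) ' ' = l.getD (k-2) ' ' ∧ l.getD (k-2) ' ' = l.getD (k-3) ' ')) := by
  induction k with
  | zero =>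
    refine ⟨0, ?_, by simp, ?_, ?_⟩
    · rw [PySem.List.pyRange_one_eq_nil (by omega)]
      simp
    · constructor
      · omega
      · rintro ⟨h, -⟩; omega
    · constructor
      · omega
      · rintro ⟨h, -⟩; omega
  | succ k ih =>
    have hkl : k < l.length := by omega
    have hgk : l.getD k ' ' = l[k] := List.getD_eq_getElem l ' ' hkl
    have htake : l.take (k+1) = l.take k ++ [l[k]] := by
      rw [List.take_add_one, List.getElem?_eq_getElem hkl]; rfl
    have hsz : ¬ (k + 1 = 0) := Nat.succ_ne_zero k
    have i1 : k + 1 - 1 = k := by omega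
    rcases Nat.eq_zero_or_pos k with rfl | hk1
    · -- first character: run becomes 1, char kept
      refine ⟨1, ?_, by omega, ?_, ?_⟩
      · have hstep0 : ∀ c, esStep ([], (none : Option Char), (0:Int)) c = ([c], some c, 1) :=
          fun c => rfl
        have ht1 : l.take 1 = [l[0]] := by
          cases l
          · simp at hkl
          · simp
        simp only [List.take_zero] at htake ⊢
        rw [htake, List.nil_append, List.foldl_cons, List.foldl_nil, hstep0, if_neg hsz, i1,
          PySem.List.pyRange_one_eq_nil (by omega), List.foldl_nil,
          show min (0+1) 3 = 1 by omega, ht1, hgk]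
      · constructor
        · omega
        · rintro ⟨h, -⟩; omega
      · constructor
        · omega
        · rintro ⟨h, -⟩; omega
    · -- k ≥ 1
      obtain ⟨r, hfold, hr1, h2, h3⟩ := ih (by omega)
      have hk0 : ¬ (k = 0) := by omega
      have i2 : k + 1 - 2 = k - 1 := by omega
      have i3 : k + 1 - 3 = k - 2 := by omega
      rw [htake, List.foldl_append, hfold, List.foldl_cons, List.foldl_nil,
        if_neg hsz, if_neg hk0, i1, i2, i3]
      have hstep : esStep ((PySem.List.pyRange 3 (k : Int) 1).foldl
            (fun ret i => if esCond l i then ret ++ [PySem.List.pyGetD l i ' '] else ret)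
            (l.take (min k 3)), some (l.getD (k-1) ' '), r) l[k]
          = (if (if l[k] == l.getD (k-1) ' ' then r + 1 else 1) ≤ 3
               then (PySem.List.pyRange 3 (k : Int) 1).foldl
                  (fun ret i => if esCond l i then ret ++ [PySem.List.pyGetD l i ' '] else ret)
                  (l.take (min k 3)) ++ [l[k]]
               else (PySem.List.pyRange 3 (k : Int) 1).foldl
                  (fun ret i => if esCond l i then ret ++ [PySem.List.pyGetD l i ' '] else ret)
                  (l.take (min k 3)),
             some l[k],
             if l[k] == l.getD (k-1) ' ' then r + 1 else 1) := rfl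
      rw [hstep]
      refine ⟨if l[k] == l.getD (k-1) ' ' then r + 1 else 1, ?_, ?_, ?_, ?_⟩
      · -- output component
        rcases Nat.lt_or_ge k 3 with hk3 | hk3
        · -- short prefix: always kept
          have hkeep : (if l[k] == l.getD (k-1) ' ' then r + 1 else 1) ≤ 3 := by
            by_cases hc : l[k] = l.getD (k-1) ' '
            · rw [if_pos (beq_iff_eq.mpr hc)]
              have : ¬ 3 ≤ r := by rw [h3]; omega
              omega
            · rw [if_neg (fun h => hc (beq_iff_eq.mp h))]
              omega
          rw [if_pos hkeep,
            PySem.List.pyRange_one_eq_nil (by omega), PySem.List.pyRange_one_eq_nil (by omega)]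
          simp only [List.foldl_nil]
          rw [show min k 3 = k by omega, show min (k+1) 3 = k + 1 by omega, htake, hgk]
        · -- in the loop range: kept exactly when A's condition holds
          have hcond : esCond l (k : Int)
              = ((l[k] != l.getD (k-1) ' ') || (l[k] != l.getD (k-2) ' ')
                 || (l[k] != l.getD (k-3) ' ')) := by
            rw [esCond, show (k : Int) - 1 = ((k-1 : Nat) : Int) by omega,
              show (k : Int) - 2 = ((k-2 : Nat) : Int) by omega,
              show (k : Int) - 3 = ((k-3 : Nat) : Int) by omega]
            simp only [PySem.List.pyGetD_natCast]
            rw [hgk]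
          have hiff : ((if l[k] == l.getD (k-1) ' ' then r + 1 else 1) ≤ 3)
              ↔ (esCond l (k : Int) = true) := by
            rw [hcond]
            simp only [Bool.or_eq_true, bne_iff_ne, ne_eq]
            by_cases hc : l[k] = l.getD (k-1) ' '
            · rw [if_pos (beq_iff_eq.mpr hc)]
              by_cases a : l.getD (k-1) ' ' = l.getD (k-2) ' '
              · by_cases b : l.getD (k-2) ' ' = l.getD (k-3) ' '
                · have : 3 ≤ r := h3.mpr ⟨hk3, a, b⟩
                  exact iff_of_false (by omega)
                    (by rintro ((h1|h2)|h3); exacts [h1 hc, h2 (hc.trans a), h3 ((hc.trans a).trans b)])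
                · have : ¬ 3 ≤ r := by rw [h3]; tauto
                  exact iff_of_true (by omega)
                    (Or.inr fun h' => b ((hc.trans a).symm.trans h'))
              · have : ¬ 3 ≤ r := by rw [h3]; tauto
                exact iff_of_true (by omega)
                  (Or.inl (Or.inr fun h' => a (hc.symm.trans h')))
            · rw [if_neg (fun h => hc (beq_iff_eq.mp h))]
              exact iff_of_true (by omega) (Or.inl (Or.inl hc))
          have hcast : ((k+1 : Nat) : Int) = (k : Int) + 1 := by push_cast; ring
          rw [hcast, PySem.List.pyRange_one_succ_right (by omega),
            List.foldl_append, List.foldl_cons, List.foldl_nil,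
            show min (k+1) 3 = min k 3 by omega]
          have hget : PySem.List.pyGetD l (k : Int) ' ' = l[k] := by
            rw [PySem.List.pyGetD_natCast]; exact hgk
          by_cases hkeep : (if l[k] == l.getD (k-1) ' ' then r + 1 else 1) ≤ 3
          · rw [if_pos hkeep, if_pos (hiff.mp hkeep), hget, hgk]
          · rw [if_neg hkeep, if_neg (fun h => hkeep (hiff.mpr h)), hgk]
      · -- 1 ≤ run'
        intro _
        have := hr1 hk0
        by_cases hc : l[k] = l.getD (k-1) ' '
        · rw [if_pos (beq_iff_eq.mpr hc)]; omega
        · rw [if_neg (fun h => hc (beq_iff_eq.mp h))]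
      · -- 2 ≤ run' ↔ …
        have := hr1 hk0
        by_cases hc : l[k] = l.getD (k-1) ' '
        · rw [if_pos (beq_iff_eq.mpr hc)]
          exact iff_of_true (by omega) ⟨by omega, hgk ▸ hc⟩
        · rw [if_neg (fun h => hc (beq_iff_eq.mp h))]
          exact iff_of_false (by omega) (fun h => hc (hgk ▸ h.2))
      · -- 3 ≤ run' ↔ …
        by_cases hc : l[k] = l.getD (k-1) ' '
        · rw [if_pos (beq_iff_eq.mpr hc)]
          constructor
          · intro h
            obtain ⟨hk2, hsecond⟩ := h2.mp (by omega)
            exact ⟨by omega, hgk ▸ hc, hsecond⟩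
          · rintro ⟨hk2, -, hgeq2⟩
            have : 2 ≤ r := h2.mpr ⟨by omega, hgeq2⟩
            omega
        · rw [if_neg (fun h => hc (beq_iff_eq.mp h))]
          exact iff_of_false (by omega) (fun h => hc (hgk ▸ h.2.1))

-- A equals the streaming machine
theorem a_eq_stream (s : String) :
    eliminate_sequences s = String.ofList (s.toList.foldl esStep ([], none, 0)).1 := by
  simp only [eliminate_sequences]
  obtain ⟨r, hfold, -, -, -⟩ := esStep_invariant s.toList s.toList.length le_rfl
  rw [List.take_length] at hfold
  rw [hfold]
  by_cases h : ((s.toList.length : Int) < 3)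
  · rw [if_pos h]
    have hn : s.toList.length < 3 := by exact_mod_cast h
    rw [PySem.List.pyRange_one_eq_nil (by omega), List.foldl_nil,
      show min s.toList.length 3 = s.toList.length by omega, List.take_length,
      String.ofList_toList]
  · rw [if_neg h]
    have h3 : (3:Int) ≤ (s.toList.length : Int) := not_lt.mp h
    have hn : 3 ≤ s.toList.length := by exact_mod_cast h3
    rw [PySem.List.slice_zero_start,
      show PySem.List.slice s.toList none (some 3) = s.toList.take 3 from by
        rw [PySem.List.slice_to s.toList (by omega : (0:Int) ≤ 3)]; rfl,
      show min s.toList.length 3 = 3 by omega]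

-- esScan finds exactly the further copies of c at the front
theorem esScan_spec (c : Char) (l : List Char) :
    l.take (esScan c l) = List.replicate (esScan c l) c ∧
    ∀ d, (l.drop (esScan c l)).head? = some d → d ≠ c := by
  induction l with
  | nil => exact ⟨rfl, by simp⟩
  | cons x xs ih =>
    by_cases hx : x = c
    · rw [esScan, if_pos (beq_iff_eq.mpr hx)]
      exact ⟨by rw [List.take_succ_cons, List.replicate_succ, ih.1, hx], by
        intro d hd; exact ih.2 d hd⟩
    · rw [esScan, if_neg (fun h => hx (beq_iff_eq.mp h))]
      refine ⟨rfl, ?_⟩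
      intro d hd
      simp only [List.drop_zero, List.head?_cons] at hd
      injection hd with h'
      exact h' ▸ hx

-- continuing a run of c in the streaming machine
theorem foldl_run_cont (c : Char) (m : Nat) : ∀ (out : List Char) (r : Nat), 1 ≤ r →
    (List.replicate m c).foldl esStep (out, some c, (r : Int)) =
      (out ++ List.replicate (min m (3 - r)) c, some c, ((r + m : Nat) : Int)) := by
  induction m with
  | zero => intro out r hr; simp
  | succ m ih =>
    intro out r hr
    rw [List.replicate_succ, List.foldl_cons]
    have hstep : esStep (out, some c, (r : Int)) c
        = (if ((r : Int) + 1) ≤ 3 then out ++ [c] else out, some c, (r : Int) + 1) := by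
      show (if (if some c == some c then (r:Int)+1 else 1) ≤ 3 then out ++ [c] else out, some c,
            if some c == some c then (r:Int)+1 else 1) = _
      rw [if_pos (by simp : (some c == some c) = true)]
    rw [hstep, show (r : Int) + 1 = ((r + 1 : Nat) : Int) by push_cast; ring,
      ih _ (r + 1) (by omega)]
    by_cases h3 : r ≤ 2
    · rw [if_pos (show ((r + 1 : Nat) : Int) ≤ 3 by omega)]
      have e1 : out ++ [c] ++ List.replicate (min m (3 - (r+1))) c
          = out ++ List.replicate (min (m+1) (3 - r)) c := by
        rw [List.append_assoc, List.singleton_append, ← List.replicate_succ,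
          show min m (3 - (r+1)) + 1 = min (m+1) (3 - r) by omega]
      rw [e1, show ((r + 1 + m : Nat) : Int) = ((r + (m + 1) : Nat) : Int) by omega]
    · rw [if_neg (show ¬ ((r + 1 : Nat) : Int) ≤ 3 by omega),
        show min m (3 - (r+1)) = 0 by omega, show min (m+1) (3 - r) = 0 by omega,
        show ((r + 1 + m : Nat) : Int) = ((r + (m + 1) : Nat) : Int) by omega]

-- a fresh run of m+1 copies of c keeps exactly its first 3 characters
theorem foldl_run_fresh (m : Nat) (out : List Char) (c : Char) (last : Option Char) (r : Int)
    (h : last ≠ some c) :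
    (List.replicate (m+1) c).foldl esStep (out, last, r) =
      (out ++ List.take 3 (List.replicate (m+1) c), some c, ((1 + m : Nat) : Int)) := by
  have hcc : ¬ (some c == last) = true := fun hb => h (beq_iff_eq.mp hb).symm
  have hstep : esStep (out, last, r) c = (out ++ [c], some c, 1) := by
    show (if (if some c == last then r+1 else 1) ≤ 3 then out ++ [c] else out, some c,
          if some c == last then r+1 else 1) = _
    rw [if_neg hcc, if_pos (by norm_num : (1:Int) ≤ 3)]
  rw [List.replicate_succ, List.foldl_cons, hstep,
    show (1 : Int) = ((1 : Nat) : Int) from rfl, foldl_run_cont c m (out ++ [c]) 1 le_rfl]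
  have e1 : out ++ [c] ++ List.replicate (min m (3 - 1)) c
      = out ++ List.take 3 (List.replicate (m+1) c) := by
    rw [List.replicate_succ, List.take_succ_cons, List.take_replicate,
      List.append_assoc, List.singleton_append, min_comm]
  rw [e1, List.replicate_succ]

-- the streaming machine computes B's run decomposition
theorem foldl_runs (l : List Char) : ∀ (out : List Char) (last : Option Char) (r : Int),
    (∀ c', l.head? = some c' → last ≠ some c') →
    (l.foldl esStep (out, last, r)).1 = out ++ (esRuns l).flatten := by
  induction l using esRuns.induct with
  | case1 => intro out last r _; simp [esRuns]
  | case2 c rest ih =>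
    intro out last r h
    obtain ⟨htake, hhead⟩ := esScan_spec c rest
    have hdecomp : c :: rest =
        List.replicate (esScan c rest + 1) c ++ rest.drop (esScan c rest) := by
      conv_lhs => rw [show rest = rest.take (esScan c rest) ++ rest.drop (esScan c rest) from
        (List.take_append_drop _ _).symm]
      rw [htake, List.replicate_succ]
      rfl
    rw [hdecomp, List.foldl_append,
      foldl_run_fresh (esScan c rest) out c last r (h c rfl),
      ih _ _ _ (by
        intro c' hc' hcc
        exact hhead c' hc' (by injection hcc with h'; exact h'.symm))]
    have hruns : esRuns (c :: rest)
        = List.take 3 (c :: rest.take (esScan c rest)) :: esRuns (rest.drop (esScan c rest)) := by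
      rw [esRuns.eq_def]
    rw [← hdecomp, hruns, List.flatten_cons, ← List.append_assoc]
    congr 2
    rw [htake, List.replicate_succ]

theorem es_eq (s : String) : eliminate_sequences s = eliminate_sequences_alt s := by
  rw [a_eq_stream, eliminate_sequences_alt,
    foldl_runs s.toList [] none 0 (by intro c' _; simp),
    List.nil_append]

-- ===== VERDICT (by name: the statement is the Claim_ definition above) =====
theorem eliminate_sequences_spec : Claim_equal_eliminate_sequences := by
  intro string _
  unfold Spec_eliminate_sequences
  exact es_eq string
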